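-- pv_equiv track=rewrite | github.com/stanford-oval/trade-dst | data_analysis/cluster-words.py | replace_with
-- ===== SOURCE A (Python) =====
-- def replace_with(sentence, string, replacement):
--     string_words = string.split()
--
--     i = 0
--     while i < len(sentence):
--         found = True
--         for j in range(len(string_words)):
--             if i+j >= len(sentence) or sentence[i+j] != string_words[j]:
--                 found = False
--                 break
--         if found:
--             yield replacement
--             i += len(string_words)
--         else:
--             yield sentence[i]
--             i += 1
-- ===== SOURCE B (Python) =====
-- def replace_with(sentence, string, replacement):
--     # Back-to-front stack processing: keep the remaining tokens on a stack
--     # (next token on top), pop either a whole match or a single token.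
--     words_rev = string.split()[::-1]
--     m = len(words_rev)
--     stack = list(sentence)[::-1]
--     while stack:
--         if m and stack[-m:] == words_rev:
--             del stack[-m:]
--             yield replacement
--         else:
--             yield stack.pop()
-- ===== Notes on version B (the rewrite author's own statement) =====
-- stated objective: alternative
-- what changed: Replaces A's index loop with an inner word-by-word comparison loop and a found flag by a stack consumed back-to-front whose top m entries are compared as a whole slice against the reversed pattern; Pre_ excludes the inputs (blank string, non-empty sentence) on which A's generator never terminates.
-- outside the precondition, e.g. on replace_with(['x'], '', 'r'): A does not finish within the time limit, B returns ['x']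
import Mathlib
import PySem

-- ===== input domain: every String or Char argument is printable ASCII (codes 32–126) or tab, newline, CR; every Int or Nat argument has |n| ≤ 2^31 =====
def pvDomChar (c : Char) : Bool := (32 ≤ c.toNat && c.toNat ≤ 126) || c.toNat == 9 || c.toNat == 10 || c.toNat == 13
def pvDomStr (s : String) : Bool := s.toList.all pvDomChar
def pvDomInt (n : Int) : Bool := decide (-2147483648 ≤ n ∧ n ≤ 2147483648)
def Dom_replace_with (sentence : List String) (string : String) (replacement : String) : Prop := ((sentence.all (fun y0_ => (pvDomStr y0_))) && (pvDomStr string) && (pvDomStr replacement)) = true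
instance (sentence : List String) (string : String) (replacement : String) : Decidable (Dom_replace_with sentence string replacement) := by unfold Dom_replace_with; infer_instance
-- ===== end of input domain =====

-- B changes the traversal: instead of A's index loop with an inner comparison loop and a
-- found flag, B consumes a stack of the remaining tokens, popping a whole m-token match
-- (compared as one slice) or a single token.  Same cost; proved equal wherever A terminates.

-- ===== PORT A =====
-- inner 'for j in range(len(string_words))' loop with its early break: all-quantified check
def pyFoundA (sentence words : List String) (i : Nat) : Bool :=
  (List.range words.length).all
    (fun j => decide (i + j < sentence.length) && (sentence.getD (i + j) "" == words.getD j ""))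

-- the 'while i < len(sentence)' loop; fuel = sentence.length bounds the iterations,
-- which suffices on Pre_ (each yielded token advances i by at least 1 there)
def goA (sentence words : List String) (replacement : String) : Nat → Nat → List String
  | 0, _ => []
  | fuel + 1, i =>
    if i < sentence.length then
      if pyFoundA sentence words i then
        replacement :: goA sentence words replacement fuel (i + words.length)
      else
        sentence.getD i "" :: goA sentence words replacement fuel (i + 1)
    else []

def replace_with (sentence : List String) (string : String) (replacement : String) : List String :=
  goA sentence (PySem.Str.split₀ string) replacement sentence.length 0

-- ===== PORT B =====
-- B's Python stack holds the remaining tokens with the NEXT token on top (at the list's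
-- end); the Lean list models that stack top-first, so the two [::-1] reversals cancel:
-- Python's 'stack[-m:] == words_rev' is 'rest.take m = words' and 'stack.pop()' is the head.
def goB (words : List String) (replacement : String) : List String → List String
  | [] => []
  | t :: rs =>
    if _h : 0 < words.length ∧ (t :: rs).take words.length = words then
      replacement :: goB words replacement ((t :: rs).drop words.length)
    else
      t :: goB words replacement rs
termination_by rest => rest.length
decreasing_by
  · simp only [List.length_drop, List.length_cons]
    omega
  · simp

def replace_with_alt (sentence : List String) (string : String) (replacement : String) : List String :=
  goB (PySem.Str.split₀ string) replacement sentence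

-- ===== PRECONDITION & SPEC =====
-- Pre_ excludes exactly the inputs on which A never terminates: a blank 'string'
-- (string.split() == []) with a non-empty sentence makes A's while loop yield forever.
def Pre_replace_with (sentence : List String) (string : String) (replacement : String) : Prop :=
  PySem.Str.split₀ string ≠ [] ∨ sentence = []
instance (sentence : List String) (string : String) (replacement : String) : Decidable (Pre_replace_with sentence string replacement) := by unfold Pre_replace_with; infer_instance

def pvWitness_replace_with : List String × String × String := (["a", "b", "c"], "b c", "X")

def Spec_replace_with (sentence : List String) (string : String) (replacement : String) (out : List String) : Prop := out = replace_with_alt sentence string replacement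
instance (sentence : List String) (string : String) (replacement : String) (out : List String) : Decidable (Spec_replace_with sentence string replacement out) := by unfold Spec_replace_with; infer_instance

-- ===== CLAIM (what is proved, stated in full; the proofs are below) =====
def Claim_equal_replace_with : Prop := ∀ (sentence : List String) (string : String) (replacement : String), Dom_replace_with sentence string replacement → Pre_replace_with sentence string replacement → Spec_replace_with sentence string replacement (replace_with sentence string replacement)

-- ===== LEMMAS AND PROOFS =====

-- A's inner loop decides whether 'words' occurs at position i
theorem pyFoundA_iff (sentence : List String) (words : List String) (i : Nat) :
    pyFoundA sentence words i = true ↔ (sentence.drop i).take words.length = words := by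
  induction words generalizing i with
  | nil => simp [pyFoundA]
  | cons a w ih =>
    have hstep : pyFoundA sentence (a :: w) i = true ↔
        ((i < sentence.length ∧ sentence.getD i "" = a) ∧ pyFoundA sentence w (i + 1) = true) := by
      simp only [pyFoundA, List.length_cons, List.range_succ_eq_map, List.all_cons, List.all_map,
        Bool.and_eq_true, decide_eq_true_eq, beq_iff_eq]
      constructor
      · rintro ⟨⟨h1, h2⟩, h3⟩
        refine ⟨⟨by simpa using h1, by simpa using h2⟩, ?_⟩
        simp only [List.all_eq_true] at h3 ⊢
        intro j hj
        have := h3 j hj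
        simpa [Function.comp, Nat.add_comm, Nat.add_assoc, Nat.add_left_comm] using this
      · rintro ⟨⟨h1, h2⟩, h3⟩
        refine ⟨⟨by simpa using h1, by simpa using h2⟩, ?_⟩
        simp only [List.all_eq_true] at h3 ⊢
        intro j hj
        have := h3 j hj
        simpa [Function.comp, Nat.add_comm, Nat.add_assoc, Nat.add_left_comm] using this
    rw [hstep, ih (i + 1)]
    by_cases hi : i < sentence.length
    · have hd : sentence.drop i = sentence[i] :: sentence.drop (i + 1) :=
        List.drop_eq_getElem_cons hi
      rw [hd, List.length_cons, List.take_succ_cons]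
      constructor
      · rintro ⟨⟨-, hg⟩, ht⟩
        rw [List.getD_eq_getElem sentence "" hi] at hg
        rw [hg, ht]
      · intro h
        injection h with h1 h2
        exact ⟨⟨hi, by rw [List.getD_eq_getElem sentence "" hi, h1]⟩, h2⟩
    · have hd : sentence.drop i = [] := List.drop_eq_nil_of_le (Nat.le_of_not_lt hi)
      simp [hd, hi]

-- the two loops agree, seen from position i, as long as fuel covers the remaining tokens
theorem goA_eq_goB (sentence words : List String) (replacement : String)
    (hw : words ≠ []) :
    ∀ fuel i, sentence.length - i ≤ fuel →
      goA sentence words replacement fuel i = goB words replacement (sentence.drop i) := by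
  have hm : 0 < words.length := List.length_pos_iff.mpr hw
  intro fuel
  induction fuel with
  | zero =>
    intro i hfi
    have : sentence.length ≤ i := by omega
    simp [goA, List.drop_eq_nil_of_le this, goB]
  | succ fuel ih =>
    intro i hfi
    by_cases hi : i < sentence.length
    · have hd : sentence.drop i = sentence[i] :: sentence.drop (i + 1) :=
        List.drop_eq_getElem_cons hi
      by_cases hfound : pyFoundA sentence words i = true
      · have htake : (sentence.drop i).take words.length = words :=
          (pyFoundA_iff sentence words i).mp hfound
        have hA : goA sentence words replacement (fuel + 1) i =
            replacement :: goA sentence words replacement fuel (i + words.length) := by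
          simp [goA, hi, hfound]
        have hB : goB words replacement (sentence.drop i) =
            replacement :: goB words replacement (sentence.drop (i + words.length)) := by
          rw [hd, goB]
          rw [dif_pos ⟨hm, by rw [← hd]; exact htake⟩]
          rw [← hd, List.drop_drop, Nat.add_comm]
        rw [hA, hB, ih (i + words.length) (by omega)]
      · have hA : goA sentence words replacement (fuel + 1) i =
            sentence.getD i "" :: goA sentence words replacement fuel (i + 1) := by
          simp [goA, hi, hfound]
        have hB : goB words replacement (sentence.drop i) =
            sentence[i] :: goB words replacement (sentence.drop (i + 1)) := by
          rw [hd, goB]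
          rw [dif_neg]
          rintro ⟨-, htake⟩
          exact hfound ((pyFoundA_iff sentence words i).mpr (by rw [hd]; exact htake))
        rw [hA, hB, ih (i + 1) (by omega), List.getD_eq_getElem sentence "" hi]
    · have hle : sentence.length ≤ i := Nat.le_of_not_lt hi
      simp [goA, hi, List.drop_eq_nil_of_le hle, goB]

-- ===== VERDICT (by name: the statement is the Claim_ definition above) =====
theorem replace_with_spec : Claim_equal_replace_with := by
  intro sentence string replacement _ hpre
  unfold Spec_replace_with replace_with replace_with_alt
  rcases hpre with hw | hs
  · simpa using goA_eq_goB sentence (PySem.Str.split₀ string) replacement hw sentence.length 0 (by omega)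
  · subst hs
    simp [goA, goB]
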